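-- pv_equiv track=rewrite | github.com/Orange9000/Codewars | Solutions/6kyu/6kyu_cut_the_ropes.py | cut_the_ropes
-- ===== SOURCE A (Python) =====
-- def cut_the_ropes(arr):
--     res = [len(arr)]
--     arr = sorted(arr)
--     while True:
--         arr = list(filter(bool, map(lambda x: x - arr[0], arr)))
--         if arr:
--             res.append(len(arr))
--         else:
--             return res
-- ===== SOURCE B (Python) =====
-- def cut_the_ropes(arr):
--     s = sorted(arr)
--     res = []
--     while s:
--         res.append(len(s))
--         v = s[0]
--         k = 0
--         while k < len(s) and s[k] == v:
--             k += 1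
--         s = s[k:]
--     return res
-- ===== Notes on version B (the rewrite author's own statement) =====
-- stated objective: faster
-- what changed: A repeatedly subtracts the minimum from every remaining rope and rebuilds the whole list each round (one pass per distinct length); B sorts once and then makes a single left-to-right scan, recording the remaining count at the start of each run of equal lengths.
-- intended difference: On the empty list A returns a one-element list holding the count 0 (it appends len(arr) before noticing nothing is left to cut); B returns an empty list, the intended answer when there are no ropes. — e.g. on cut_the_ropes([]): A returns [0], B returns []
import Mathlib
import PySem

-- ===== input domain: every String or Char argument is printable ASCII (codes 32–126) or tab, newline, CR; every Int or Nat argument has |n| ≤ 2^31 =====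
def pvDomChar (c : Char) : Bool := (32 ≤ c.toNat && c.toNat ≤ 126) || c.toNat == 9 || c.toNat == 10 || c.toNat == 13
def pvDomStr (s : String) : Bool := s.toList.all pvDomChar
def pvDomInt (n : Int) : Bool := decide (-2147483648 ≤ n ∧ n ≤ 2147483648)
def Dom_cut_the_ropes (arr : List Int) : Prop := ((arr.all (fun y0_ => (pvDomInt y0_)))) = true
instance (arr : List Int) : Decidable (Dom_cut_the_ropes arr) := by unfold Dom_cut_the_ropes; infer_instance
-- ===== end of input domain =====

-- B replaces A's repeated subtract-the-minimum-and-refilter loop by sort once, then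
-- scan past each run of equal values recording the remaining length (objective: faster).

-- ===== PORT A =====
-- termination fact for A's while loop (the minimum maps to 0 and is filtered out)
theorem cutA_dec (a : Int) (rest : List Int) :
    (((a :: rest).map (fun x => x - a)).filter (fun x => x ≠ 0)).length < (a :: rest).length := by
  simp only [List.map_cons, sub_self, List.filter_cons]
  simp only [ne_eq, not_true_eq_false, decide_false, Bool.false_eq_true, if_false]
  calc ((rest.map (fun x => x - a)).filter (fun x => decide (x ≠ 0))).length
      ≤ (rest.map (fun x => x - a)).length := List.length_filter_le _ _
    _ = rest.length := List.length_map ..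
    _ < (a :: rest).length := by simp

-- the while loop of A: arr = list(filter(bool, map(lambda x: x - arr[0], arr))); append len while nonempty
def cutLoopA (l : List Int) (res : List Int) : List Int :=
  match l with
  | [] => res          -- Python's map/filter are lazy: on [] the loop body returns res at once
  | a :: rest =>
    let arr' := ((a :: rest).map (fun x => x - a)).filter (fun x => x ≠ 0)
    if arr' = [] then res else cutLoopA arr' (res ++ [(arr'.length : Int)])
termination_by l.length
decreasing_by exact cutA_dec a rest

def cut_the_ropes (arr : List Int) : List Int :=
  cutLoopA (PySem.List.sorted arr (fun x => x) false) [(arr.length : Int)]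

-- ===== PORT B =====
-- inner while of B: how many leading elements of s equal v
def runLenB (v : Int) : List Int → Nat
  | [] => 0
  | x :: xs => if x == v then runLenB v xs + 1 else 0

-- outer while of B: append len(s), scan past the leading run, slice it off
def cutLoopB (s : List Int) (res : List Int) : List Int :=
  match s with
  | [] => res
  | v :: rest =>
    let k := runLenB v (v :: rest)
    cutLoopB ((v :: rest).drop k) (res ++ [((v :: rest).length : Int)])
termination_by s.length
decreasing_by
  simp only [runLenB, BEq.rfl, if_true, List.drop_succ_cons, List.length_drop,
    List.length_cons]
  omega

def cut_the_ropes_alt (arr : List Int) : List Int :=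
  cutLoopB (PySem.List.sorted arr (fun x => x) false) []

-- ===== PRECONDITION & SPEC =====
-- On the empty list A returns a one-element list holding the count 0 (it appends
-- len(arr) before noticing nothing is left to cut); B returns an empty list, the
-- intended answer when there are no ropes.
def D_cut_the_ropes (arr : List Int) : Prop := arr = []
instance (arr : List Int) : Decidable (D_cut_the_ropes arr) := by unfold D_cut_the_ropes; infer_instance

def Spec_cut_the_ropes (arr : List Int) (out : List Int) : Prop := ¬ D_cut_the_ropes arr → out = cut_the_ropes_alt arr
instance (arr : List Int) (out : List Int) : Decidable (Spec_cut_the_ropes arr out) := by unfold Spec_cut_the_ropes; infer_instance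

def pvDiffWitness_cut_the_ropes : List Int := []
def pvDiffWitnessOut_cut_the_ropes : (List Int) × (List Int) := ([0], [])

-- ===== CLAIM =====
def Claim_unchanged_cut_the_ropes : Prop := ∀ (arr : List Int), Dom_cut_the_ropes arr → Spec_cut_the_ropes arr (cut_the_ropes arr)
def Claim_changed_cut_the_ropes : Prop := Dom_cut_the_ropes (pvDiffWitness_cut_the_ropes) ∧ D_cut_the_ropes (pvDiffWitness_cut_the_ropes) ∧ cut_the_ropes (pvDiffWitness_cut_the_ropes) = pvDiffWitnessOut_cut_the_ropes.1 ∧ cut_the_ropes_alt (pvDiffWitness_cut_the_ropes) = pvDiffWitnessOut_cut_the_ropes.2 ∧ pvDiffWitnessOut_cut_the_ropes.1 ≠ pvDiffWitnessOut_cut_the_ropes.2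
def Claim_exact_cut_the_ropes : Prop := ∀ (arr : List Int), Dom_cut_the_ropes arr → D_cut_the_ropes arr → cut_the_ropes arr ≠ cut_the_ropes_alt arr

-- ===== LEMMAS AND PROOFS =====

-- unfolding equations for the two well-founded loops
theorem cutLoopA_nil (res : List Int) : cutLoopA [] res = res := by
  rw [cutLoopA.eq_def]

theorem cutLoopA_cons (a : Int) (rest res : List Int) :
    cutLoopA (a :: rest) res =
      if (((a :: rest).map (fun x => x - a)).filter (fun x => x ≠ 0)) = []
      then res
      else cutLoopA (((a :: rest).map (fun x => x - a)).filter (fun x => x ≠ 0))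
             (res ++ [((((a :: rest).map (fun x => x - a)).filter (fun x => x ≠ 0)).length : Int)]) := by
  rw [cutLoopA.eq_def]

theorem cutLoopB_nil (res : List Int) : cutLoopB [] res = res := by
  rw [cutLoopB.eq_def]

theorem cutLoopB_cons (v : Int) (rest res : List Int) :
    cutLoopB (v :: rest) res
      = cutLoopB ((v :: rest).drop (runLenB v (v :: rest)))
          (res ++ [((v :: rest).length : Int)]) := by
  rw [cutLoopB.eq_def]

-- On a sorted list whose elements are all ≥ a, dropping B's leading run of a's
-- is the same as filtering out every copy of a (they all sit at the front).
theorem filter_eq_drop_runLen (a : Int) :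
    ∀ (l : List Int), (∀ x ∈ l, a ≤ x) → l.Pairwise (· ≤ ·) →
      l.filter (fun x => x ≠ a) = l.drop (runLenB a l) := by
  intro l
  induction l with
  | nil => intro _ _; rfl
  | cons x xs ih =>
    intro hlo hp
    rw [List.pairwise_cons] at hp
    by_cases hx : x = a
    · subst hx
      simp only [List.filter_cons, runLenB, BEq.rfl, if_true, List.drop_succ_cons,
        ne_eq, not_true_eq_false, decide_false, Bool.false_eq_true, if_false]
      exact ih (fun y hy => hlo y (List.mem_cons_of_mem _ hy)) hp.2
    · have hxa : a < x := lt_of_le_of_ne (hlo x (List.mem_cons_self)) (fun h => hx h.symm)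
      have hall : ∀ y ∈ x :: xs, y ≠ a := by
        intro y hy
        rcases List.mem_cons.mp hy with h | h
        · omega
        · have := hp.1 y h; omega
      rw [List.filter_eq_self.mpr (fun y hy => by simpa using hall y hy)]
      have h0 : runLenB a (x :: xs) = 0 := by
        simp [runLenB, show (x == a) = false from by simpa using hx]
      rw [h0]; rfl

-- A's loop is translation-invariant: subtracting a constant from every rope
-- changes neither the lengths recorded nor the termination pattern.
theorem cutLoopA_map_sub (F : List Int) (c : Int) (res : List Int) :
    cutLoopA (F.map (fun x => x - c)) res = cutLoopA F res := by
  cases F with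
  | nil => rfl
  | cons x xs =>
    rw [List.map_cons, cutLoopA_cons, cutLoopA_cons]
    have hmm : (((x - c) :: xs.map (fun y => y - c)).map (fun y => y - (x - c)))
        = (x :: xs).map (fun y => y - x) := by
      simp only [List.map_cons, List.map_map, sub_self]
      congr 1
      apply List.map_congr_left
      intro y _
      simp only [Function.comp_apply]
      ring
    rw [hmm]

-- the heart: on a sorted nonempty list both loops produce the same extensions
theorem cutLoopA_eq_cutLoopB :
    ∀ (n : Nat) (l res : List Int), l.length ≤ n → l.Pairwise (· ≤ ·) → l ≠ [] →
      cutLoopA l (res ++ [(l.length : Int)]) = cutLoopB l res := by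
  intro n
  induction n with
  | zero =>
    intro l res hn _ hne
    cases l with
    | nil => exact absurd rfl hne
    | cons a rest => simp at hn
  | succ n ih =>
    intro l res hn hp hne
    cases l with
    | nil => exact absurd rfl hne
    | cons a rest =>
      have hlo : ∀ x ∈ a :: rest, a ≤ x := by
        intro x hx
        rcases List.mem_cons.mp hx with h | h
        · omega
        · exact (List.pairwise_cons.mp hp).1 x h
      set F : List Int := rest.filter (fun x => x ≠ a) with hF
      -- A's new list is F translated by -a
      have hA : ((a :: rest).map (fun x => x - a)).filter (fun x => x ≠ 0)
          = F.map (fun x => x - a) := by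
        simp only [List.map_cons, sub_self, List.filter_cons]
        simp only [ne_eq, not_true_eq_false, decide_false, Bool.false_eq_true, if_false]
        rw [List.filter_map]
        rw [hF]
        congr 1
        apply List.filter_congr
        intro y _
        simp [Function.comp, sub_eq_zero]
      -- B's new list is F
      have hB : (a :: rest).drop (runLenB a (a :: rest)) = F := by
        have h1 := filter_eq_drop_runLen a (a :: rest) hlo hp
        have h2 : (a :: rest).filter (fun x => x ≠ a) = rest.filter (fun x => x ≠ a) := by
          simp only [List.filter_cons, ne_eq, not_true_eq_false, decide_false,
            Bool.false_eq_true, if_false]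
        rw [← h1, h2, hF]
      have hFsub : F.Sublist (a :: rest) :=
        List.Sublist.trans (List.filter_sublist) (List.sublist_cons_self a rest)
      have hFp : F.Pairwise (· ≤ ·) := hp.sublist hFsub
      have hFlen : F.length ≤ n := by
        have h3 := List.length_filter_le (fun x => decide (x ≠ a)) rest
        simp only [List.length_cons] at hn
        simp only [hF]; omega
      rw [cutLoopA_cons, cutLoopB_cons, hA, hB]
      by_cases hFe : F = []
      · simp only [hFe, List.map_nil, if_true]
        rw [cutLoopB_nil]
      · have hmape : F.map (fun x => x - a) ≠ [] := by simp [hFe]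
        rw [if_neg hmape]
        rw [List.length_map, cutLoopA_map_sub]
        exact ih F (res ++ [((a :: rest).length : Int)]) hFlen hFp hFe

-- ===== VERDICT =====
theorem cut_the_ropes_spec : Claim_unchanged_cut_the_ropes := by
  intro arr _ hd
  unfold D_cut_the_ropes at hd
  unfold cut_the_ropes cut_the_ropes_alt
  have hne : PySem.List.sorted arr (fun x => x) false ≠ [] := by
    rw [ne_eq, PySem.List.sorted_eq_nil_iff]; exact hd
  have hp : (PySem.List.sorted arr (fun x => x) false).Pairwise (· ≤ ·) :=
    PySem.List.sorted_pairwise arr (fun x => x)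
  have hlen : (PySem.List.sorted arr (fun x => x) false).length = arr.length :=
    PySem.List.length_sorted arr _ _
  rw [← hlen]
  exact cutLoopA_eq_cutLoopB (PySem.List.sorted arr (fun x => x) false).length
    (PySem.List.sorted arr (fun x => x) false) [] le_rfl hp hne

theorem cut_the_ropes_changed : Claim_changed_cut_the_ropes := by
  unfold Claim_changed_cut_the_ropes
  refine ⟨by decide, rfl, ?_, ?_, by decide⟩
  · show cut_the_ropes [] = [0]
    unfold cut_the_ropes
    exact cutLoopA_nil [(0 : Int)]
  · show cut_the_ropes_alt [] = []
    unfold cut_the_ropes_alt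
    exact cutLoopB_nil []

theorem cut_the_ropes_tight : Claim_exact_cut_the_ropes := by
  intro arr _ hd
  unfold D_cut_the_ropes at hd
  subst hd
  have h1 : cut_the_ropes [] = [0] := cutLoopA_nil [(0 : Int)]
  have h2 : cut_the_ropes_alt [] = [] := cutLoopB_nil []
  rw [h1, h2]
  decide
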